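-- pv_equiv track=rewrite | github.com/kevung/gbf | scripts/lib/board_predicates.py | can_hit_this_roll
-- ===== SOURCE A (Python) =====
-- from typing import Sequence
--
-- def _blot_positions_p1_coord(board_p2: Sequence[int]) -> list[int]:
--     """p2 blot positions, expressed in p1's coordinate system (1..24)."""
--     return [25 - j for j in range(1, 25) if board_p2[j] == 1]
--
-- def _p2_made_p1_coord(board_p2: Sequence[int]) -> set[int]:
--     """p2 made points (>=2), in p1's coordinate system."""
--     return {25 - j for j in range(1, 25) if board_p2[j] >= 2}
--
-- def can_hit_this_roll(
--     board_p1: Sequence[int],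
--     board_p2: Sequence[int],
--     dice: Sequence[int] | None,
-- ) -> bool:
--     """Return True if p1 can hit a p2 blot on this roll.
--
--     Structural reachability only — does not enumerate legal move
--     sequences. Covers direct hits with each die, combined hits using
--     both dice with a non-blocked intermediate, and bar-entry hits.
--     Doubles are treated as a single direct die (the combined-direction
--     logic suffices for the theme threshold; false negatives on
--     4-step doubles hits are acceptable for theme classification).
--     """
--     if dice is None or len(dice) < 2:
--         return False
--     d1, d2 = int(dice[0]), int(dice[1])
--
--     blots = _blot_positions_p1_coord(board_p2)
--     if not blots:
--         return False
--
--     # Bar case — p1 must enter before hitting from the outfield. Bar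
--     # entry lands at p1-points 25-die (i.e. d1 enters on point 25-d1 on
--     # the opponent home board).
--     if board_p1[0] > 0:
--         for d in {d1, d2}:
--             entry = 25 - d
--             if entry in blots:
--                 return True
--         return False
--
--     p1_pos = {i for i in range(1, 25) if board_p1[i] > 0}
--     p2_made = _p2_made_p1_coord(board_p2)
--
--     # Direct hits.
--     for y in blots:
--         for d in {d1, d2}:
--             src = y + d
--             if src <= 24 and src in p1_pos:
--                 return True
--
--     # Combined hit using both dice: checker at y+d1+d2, intermediate at
--     # y+d1 or y+d2 must not be a p2 made point.
--     if d1 != d2: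
--         for y in blots:
--             src = y + d1 + d2
--             if src <= 24 and src in p1_pos:
--                 if (y + d1) <= 24 and (y + d1) not in p2_made:
--                     return True
--                 if (y + d2) <= 24 and (y + d2) not in p2_made:
--                     return True
--     else:
--         # Doubles: consider 2-step and 3-step hits as well, each
--         # intermediate checked against p2 made points.
--         d = d1
--         for y in blots:
--             for k in (2, 3, 4):
--                 src = y + k * d
--                 if src > 24 or src not in p1_pos:
--                     continue
--                 intermediates_clear = True
--                 for m in range(1, k):
--                     inter = y + m * d
--                     if inter in p2_made:
--                         intermediates_clear = False
--                         break
--                 if intermediates_clear: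
--                     return True
--
--     return False
-- ===== SOURCE B (Python) =====
-- def can_hit_this_roll(board_p1, board_p2, dice):
--     """B: instead of scanning blots and probing checker sources (A), scan p1's
--     checkers once and build the set of squares reachable this roll, then test
--     it against the blot list.  Same guards and the same intermediate-point
--     rules, expressed from the checker side."""
--     if dice is None or len(dice) < 2:
--         return False
--     d1, d2 = int(dice[0]), int(dice[1])
--
--     blots = [25 - j for j in range(1, 25) if board_p2[j] == 1]
--     if not blots:
--         return False
--
--     if board_p1[0] > 0:
--         return 25 - d1 in blots or 25 - d2 in blots
--
--     made = {25 - j for j in range(1, 25) if board_p2[j] >= 2}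
--
--     reachable = set()
--     for i in range(1, 25):
--         if board_p1[i] <= 0:
--             continue
--         reachable.add(i - d1)
--         reachable.add(i - d2)
--         if d1 != d2:
--             if (i - d2 <= 24 and i - d2 not in made) or \
--                (i - d1 <= 24 and i - d1 not in made):
--                 reachable.add(i - d1 - d2)
--         else:
--             for k in (2, 3, 4):
--                 if all(i - m * d1 not in made for m in range(1, k)):
--                     reachable.add(i - k * d1)
--
--     return any(y in reachable for y in blots)
-- ===== Notes on version B (the rewrite author's own statement) =====
-- stated objective: alternative
-- what changed: For the non-bar case, instead of scanning each blot and probing its possible source squares against a set of p1 points (A), B makes one pass over p1's occupied points building the set of all landing squares reachable this roll (applying the same intermediate-point rules from the checker side) and then tests the blots against that set.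
import Mathlib
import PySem

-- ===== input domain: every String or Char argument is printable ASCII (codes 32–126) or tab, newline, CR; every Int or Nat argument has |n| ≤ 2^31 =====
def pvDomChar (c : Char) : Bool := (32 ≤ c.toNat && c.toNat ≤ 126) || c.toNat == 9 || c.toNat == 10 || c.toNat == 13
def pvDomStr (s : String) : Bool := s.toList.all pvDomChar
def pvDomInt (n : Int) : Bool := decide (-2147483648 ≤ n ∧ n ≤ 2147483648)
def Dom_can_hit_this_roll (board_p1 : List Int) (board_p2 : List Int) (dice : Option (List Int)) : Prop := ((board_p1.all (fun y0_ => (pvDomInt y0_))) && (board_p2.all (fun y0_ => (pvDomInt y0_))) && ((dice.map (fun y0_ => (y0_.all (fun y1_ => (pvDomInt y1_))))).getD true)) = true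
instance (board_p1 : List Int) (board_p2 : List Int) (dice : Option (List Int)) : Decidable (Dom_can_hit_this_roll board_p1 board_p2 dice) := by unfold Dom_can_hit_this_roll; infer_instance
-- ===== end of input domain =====

-- B re-implements the non-bar search from the checker side (one pass over p1's
-- points building the set of reachable landing squares, then one membership
-- pass over the blots) instead of A's blot-by-blot probing of source squares;
-- the guards and intermediate-point rules are unchanged (objective: alternative).

-- ===== PORT A =====
-- helper: p2 blot positions in p1 coordinates (A's _blot_positions_p1_coord)
def pvBlots (board_p2 : List Int) : List Int :=
  ((PySem.List.pyRange 1 25 1).filter (fun j => PySem.List.pyGetD board_p2 j 0 == 1)).map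
    (fun j => 25 - j)

-- helper: p2 made points (>= 2) in p1 coordinates, as a set (A's _p2_made_p1_coord)
def pvMade (board_p2 : List Int) : PySem.Set Int :=
  PySem.Set.ofList
    (((PySem.List.pyRange 1 25 1).filter (fun j => PySem.List.pyGetD board_p2 j 0 ≥ 2)).map
      (fun j => 25 - j))

def can_hit_this_roll (board_p1 : List Int) (board_p2 : List Int) (dice : Option (List Int)) : Bool :=
  match dice with
  | none => false
  | some ds =>
    match ds with
    | d1 :: d2 :: _ =>
      let blots := pvBlots board_p2
      if blots.isEmpty then false
      else if 0 < PySem.List.pyGetD board_p1 0 0 then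
        -- bar case: iterate the die set {d1, d2} (result is order-independent)
        (PySem.Set.ofList [d1, d2]).any (fun d => blots.contains (25 - d))
      else
        let p1pos : PySem.Set Int :=
          PySem.Set.ofList ((PySem.List.pyRange 1 25 1).filter
            (fun i => 0 < PySem.List.pyGetD board_p1 i 0))
        let p2made := pvMade board_p2
        -- direct hits
        if blots.any (fun y => (PySem.Set.ofList [d1, d2]).any
            (fun d => y + d ≤ 24 && p1pos.contains (y + d))) then true
        else if d1 ≠ d2 then
          -- combined hit with both dice
          blots.any (fun y =>
            (y + d1 + d2 ≤ 24 && p1pos.contains (y + d1 + d2)) &&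
            ((y + d1 ≤ 24 && !p2made.contains (y + d1)) ||
             (y + d2 ≤ 24 && !p2made.contains (y + d2))))
        else
          -- doubles: 2-, 3-, 4-step hits, intermediates checked against made points
          blots.any (fun y => [(2 : Int), 3, 4].any (fun k =>
            (y + k * d1 ≤ 24 && p1pos.contains (y + k * d1)) &&
            (PySem.List.pyRange 1 k 1).all (fun m => !p2made.contains (y + m * d1))))
    | _ => false

-- ===== PORT B =====
-- helper: B's loop body — add the squares reachable from p1 point i to the set s
def pvAltStep (board_p1 : List Int) (made : PySem.Set Int) (d1 d2 : Int)
  (s : PySem.Set Int) (i : Int) : PySem.Set Int :=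
if PySem.List.pyGetD board_p1 i 0 ≤ 0 then s
else
  let s1 := PySem.Set.add s (i - d1)
  let s2 := PySem.Set.add s1 (i - d2)
  if d1 ≠ d2 then
    if (i - d2 ≤ 24 && !made.contains (i - d2)) ||
       (i - d1 ≤ 24 && !made.contains (i - d1)) then
      PySem.Set.add s2 (i - d1 - d2)
    else s2
  else
    [(2 : Int), 3, 4].foldl (fun s k =>
      if (PySem.List.pyRange 1 k 1).all (fun m => !made.contains (i - m * d1)) then
        PySem.Set.add s (i - k * d1)
      else s) s2

def can_hit_this_roll_alt (board_p1 : List Int) (board_p2 : List Int) (dice : Option (List Int)) : Bool :=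
  if dice.isNone || (dice.getD []).length < 2 then false
  else
    let ds := dice.getD []
    let d1 := PySem.List.pyGetD ds 0 0
    let d2 := PySem.List.pyGetD ds 1 0
    let blots := ((PySem.List.pyRange 1 25 1).filter
      (fun j => PySem.List.pyGetD board_p2 j 0 == 1)).map (fun j => 25 - j)
    if blots.isEmpty then false
    else if 0 < PySem.List.pyGetD board_p1 0 0 then
      blots.contains (25 - d1) || blots.contains (25 - d2)
    else
      let made : PySem.Set Int := PySem.Set.ofList
        (((PySem.List.pyRange 1 25 1).filter
          (fun j => PySem.List.pyGetD board_p2 j 0 ≥ 2)).map (fun j => 25 - j))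
      let reachable : PySem.Set Int :=
        (PySem.List.pyRange 1 25 1).foldl (pvAltStep board_p1 made d1 d2) PySem.Set.empty
      blots.any (fun y => reachable.contains y)

-- ===== PRECONDITION & SPEC =====
-- Pre_ = exactly the inputs where the Python A returns (no IndexError): with a
-- real roll it needs board_p2[1..24]; board_p1 is indexed only when a blot
-- exists (then [0], and [1..24] unless p1 is on the bar).
def Pre_can_hit_this_roll (board_p1 : List Int) (board_p2 : List Int) (dice : Option (List Int)) : Prop :=
  (dice.getD []).length < 2 ∨
  (25 ≤ board_p2.length ∧
    ((∀ j ∈ PySem.List.pyRange 1 25 1, PySem.List.pyGetD board_p2 j 0 ≠ 1) ∨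
     (1 ≤ board_p1.length ∧
       (0 < PySem.List.pyGetD board_p1 0 0 ∨ 25 ≤ board_p1.length))))
instance (board_p1 : List Int) (board_p2 : List Int) (dice : Option (List Int)) : Decidable (Pre_can_hit_this_roll board_p1 board_p2 dice) := by unfold Pre_can_hit_this_roll; infer_instance

def pvWitness_can_hit_this_roll : List Int × List Int × Option (List Int) :=
  ([0, 2, 0, 0, 0, 0, 0, 0, 0, 0, 0, 0, 0, 0, 0, 0, 0, 0, 0, 0, 0, 0, 0, 0, 0],
   [0, 0, 0, 0, 0, 1, 0, 0, 0, 0, 0, 0, 0, 0, 0, 0, 0, 0, 0, 0, 0, 0, 0, 0, 0],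
   some [3, 4])

def Spec_can_hit_this_roll (board_p1 : List Int) (board_p2 : List Int) (dice : Option (List Int)) (out : Bool) : Prop := out = can_hit_this_roll_alt board_p1 board_p2 dice
instance (board_p1 : List Int) (board_p2 : List Int) (dice : Option (List Int)) (out : Bool) : Decidable (Spec_can_hit_this_roll board_p1 board_p2 dice out) := by unfold Spec_can_hit_this_roll; infer_instance

-- ===== CLAIM (what is proved, stated in full; the proofs are below) =====
def Claim_equal_can_hit_this_roll : Prop := ∀ (board_p1 : List Int) (board_p2 : List Int) (dice : Option (List Int)), Dom_can_hit_this_roll board_p1 board_p2 dice → Pre_can_hit_this_roll board_p1 board_p2 dice → Spec_can_hit_this_roll board_p1 board_p2 dice (can_hit_this_roll board_p1 board_p2 dice)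

-- ===== LEMMAS AND PROOFS =====

-- what pvAltStep adds for point i, as a predicate on the added square y
def pvAdds (made : PySem.Set Int) (d1 d2 : Int) (i y : Int) : Prop :=
  y = i - d1 ∨ y = i - d2 ∨
  (d1 ≠ d2 ∧
    ((i - d2 ≤ 24 && !made.contains (i - d2)) ||
     (i - d1 ≤ 24 && !made.contains (i - d1))) = true ∧ y = i - d1 - d2) ∨
  (d1 = d2 ∧
    (((PySem.List.pyRange 1 (2 : Int) 1).all (fun m => !made.contains (i - m * d1)) = true ∧
        y = i - 2 * d1) ∨
     ((PySem.List.pyRange 1 (3 : Int) 1).all (fun m => !made.contains (i - m * d1)) = true ∧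
        y = i - 3 * d1) ∨
     ((PySem.List.pyRange 1 (4 : Int) 1).all (fun m => !made.contains (i - m * d1)) = true ∧
        y = i - 4 * d1)))

lemma mem_pvAltStep (board_p1 : List Int) (made : PySem.Set Int) (d1 d2 : Int)
    (s : PySem.Set Int) (i y : Int) :
    y ∈ pvAltStep board_p1 made d1 d2 s i ↔
      y ∈ s ∨ (0 < PySem.List.pyGetD board_p1 i 0 ∧ pvAdds made d1 d2 i y) := by
  unfold pvAltStep pvAdds
  split_ifs with h1 h2 h3
  · have : ¬ 0 < PySem.List.pyGetD board_p1 i 0 := by omega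
    tauto
  · have hp : 0 < PySem.List.pyGetD board_p1 i 0 := by omega
    simp only [PySem.Set.mem_add]
    tauto
  · have hp : 0 < PySem.List.pyGetD board_p1 i 0 := by omega
    simp only [PySem.Set.mem_add]
    tauto
  · have hp : 0 < PySem.List.pyGetD board_p1 i 0 := by omega
    have hd : d1 = d2 := by tauto
    simp only [List.foldl_cons, List.foldl_nil]
    split_ifs with c2 c3 c4 <;> simp only [PySem.Set.mem_add] <;> tauto

lemma mem_foldl_pvAltStep (board_p1 : List Int) (made : PySem.Set Int) (d1 d2 : Int)
    (L : List Int) (s : PySem.Set Int) (y : Int) :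
    y ∈ L.foldl (pvAltStep board_p1 made d1 d2) s ↔
      y ∈ s ∨ ∃ i ∈ L, 0 < PySem.List.pyGetD board_p1 i 0 ∧ pvAdds made d1 d2 i y := by
  induction L generalizing s with
  | nil => simp
  | cons a L ih =>
    simp only [List.foldl_cons, ih, mem_pvAltStep, List.exists_mem_cons_iff]
    tauto

lemma reach_iff (b1 : List Int) (made : PySem.Set Int) (d1 d2 y : Int) :
    ((PySem.List.pyRange 1 25 1).foldl (pvAltStep b1 made d1 d2)
      PySem.Set.empty).contains y = true ↔
    ∃ i ∈ PySem.List.pyRange 1 25 1,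
      0 < PySem.List.pyGetD b1 i 0 ∧ pvAdds made d1 d2 i y := by
  rw [PySem.Set.contains_iff, mem_foldl_pvAltStep]
  simp [PySem.Set.empty]

lemma p1pos_iff (b1 : List Int) (t : Int) :
    (PySem.Set.ofList ((PySem.List.pyRange 1 25 1).filter
      (fun i => 0 < PySem.List.pyGetD b1 i 0))).contains t = true ↔
    (t ∈ PySem.List.pyRange 1 25 1 ∧ 0 < PySem.List.pyGetD b1 t 0) := by
  rw [PySem.Set.contains_iff, PySem.Set.mem_ofList, List.mem_filter]
  simp

lemma pair_set_any (p : Int → Bool) (d1 d2 : Int) :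
    (PySem.Set.ofList [d1, d2]).any p = (p d1 || p d2) := by
  by_cases h : d2 = d1
  · subst h
    simp [PySem.Set.ofList, PySem.Set.add]
  · simp [PySem.Set.ofList, PySem.Set.add, h]

lemma hL24 : ∀ i ∈ PySem.List.pyRange 1 25 1, (1 : Int) ≤ i ∧ i ≤ 24 := by decide

lemma all_shift (made : PySem.Set Int) (d y : Int) (k : Int) (hk : k = 2 ∨ k = 3 ∨ k = 4) :
    ((PySem.List.pyRange 1 k 1).all (fun m => !made.contains (y + k * d - m * d)) = true) ↔
    ((PySem.List.pyRange 1 k 1).all (fun m => !made.contains (y + m * d)) = true) := by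
  rcases hk with rfl | rfl | rfl
  · rw [show PySem.List.pyRange 1 (2 : Int) 1 = [1] from by decide]
    simp only [List.all_cons, List.all_nil, Bool.and_true, Bool.not_eq_true']
    rw [show y + 2 * d - 1 * d = y + 1 * d from by ring]
  · rw [show PySem.List.pyRange 1 (3 : Int) 1 = [1, 2] from by decide]
    simp only [List.all_cons, List.all_nil, Bool.and_true, Bool.and_eq_true,
      Bool.not_eq_true']
    rw [show y + 3 * d - 1 * d = y + 2 * d from by ring,
        show y + 3 * d - 2 * d = y + 1 * d from by ring]
    tauto
  · rw [show PySem.List.pyRange 1 (4 : Int) 1 = [1, 2, 3] from by decide]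
    simp only [List.all_cons, List.all_nil, Bool.and_true, Bool.and_eq_true,
      Bool.not_eq_true']
    rw [show y + 4 * d - 1 * d = y + 3 * d from by ring,
        show y + 4 * d - 2 * d = y + 2 * d from by ring,
        show y + 4 * d - 3 * d = y + 1 * d from by ring]
    tauto

theorem core_eq (board_p1 board_p2 : List Int) (d1 d2 : Int) (rest : List Int) :
    can_hit_this_roll board_p1 board_p2 (some (d1 :: d2 :: rest)) =
    can_hit_this_roll_alt board_p1 board_p2 (some (d1 :: d2 :: rest)) := by
  have e0 : PySem.List.pyGetD (d1 :: d2 :: rest) 0 0 = d1 :=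
    PySem.List.pyGetD_zero_cons ..
  have e1 : PySem.List.pyGetD (d1 :: d2 :: rest) 1 0 = d2 := by
    simp [PySem.List.pyGetD_ofNat']
  simp only [can_hit_this_roll_alt, Option.isNone_some, Option.getD_some, Bool.false_or,
    List.length_cons, e0, e1]
  rw [if_neg (by simp)]
  simp only [can_hit_this_roll, pvBlots, pvMade]
  split_ifs with hbe hbar hdir hd
  · rfl
  · exact pair_set_any (fun d =>
      (((PySem.List.pyRange 1 25 1).filter
        (fun j => PySem.List.pyGetD board_p2 j 0 == 1)).map (fun j => 25 - j)).contains (25 - d)) d1 d2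
  · -- a direct hit exists
    rw [List.any_eq_true] at hdir
    obtain ⟨y, hy, hdy⟩ := hdir
    rw [pair_set_any] at hdy
    simp only [Bool.or_eq_true, Bool.and_eq_true, decide_eq_true_eq, p1pos_iff] at hdy
    symm
    rw [List.any_eq_true]
    refine ⟨y, hy, ?_⟩
    rw [reach_iff]
    rcases hdy with ⟨hle, hiL, hpos⟩ | ⟨hle, hiL, hpos⟩
    · exact ⟨y + d1, hiL, hpos, Or.inl (by ring)⟩
    · exact ⟨y + d2, hiL, hpos, Or.inr (Or.inl (by ring))⟩
  · -- no direct hit, d1 ≠ d2: combined hits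
    have hnd : ∀ x ∈ ((PySem.List.pyRange 1 25 1).filter
        (fun j => PySem.List.pyGetD board_p2 j 0 == 1)).map (fun j => 25 - j),
        ¬ ((PySem.Set.ofList [d1, d2]).any
          (fun d => decide (x + d ≤ 24) && (PySem.Set.ofList ((PySem.List.pyRange 1 25 1).filter
            (fun i => decide (0 < PySem.List.pyGetD board_p1 i 0)))).contains (x + d)) = true) := by
      intro x hx hfx
      exact hdir (List.any_eq_true.mpr ⟨x, hx, hfx⟩)
    rw [Bool.eq_iff_iff, List.any_eq_true, List.any_eq_true]
    constructor
    · rintro ⟨y, hy, hcomb⟩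
      simp only [Bool.and_eq_true, decide_eq_true_eq, p1pos_iff] at hcomb
      obtain ⟨⟨hle, hiL, hpos⟩, hcond⟩ := hcomb
      refine ⟨y, hy, ?_⟩
      rw [reach_iff]
      refine ⟨y + d1 + d2, hiL, hpos, Or.inr (Or.inr (Or.inl ⟨hd, ?_, by ring⟩))⟩
      rw [show y + d1 + d2 - d2 = y + d1 from by ring,
          show y + d1 + d2 - d1 = y + d2 from by ring]
      exact hcond
    · rintro ⟨y, hy, hre⟩
      rw [reach_iff] at hre
      obtain ⟨i, hiL, hpos, hadds⟩ := hre
      have hle := (hL24 i hiL).2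
      rcases hadds with h | h | ⟨_, hcond, hyi⟩ | ⟨heq, _⟩
      · exfalso
        have hth := hnd y hy
        rw [pair_set_any] at hth
        simp only [Bool.or_eq_true, Bool.and_eq_true, decide_eq_true_eq, p1pos_iff,
          not_or] at hth
        have hyi : y + d1 = i := by omega
        exact hth.1 ⟨by omega, by rw [hyi]; exact ⟨hiL, hpos⟩⟩
      · exfalso
        have hth := hnd y hy
        rw [pair_set_any] at hth
        simp only [Bool.or_eq_true, Bool.and_eq_true, decide_eq_true_eq, p1pos_iff,
          not_or] at hth
        have hyi : y + d2 = i := by omega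
        exact hth.2 ⟨by omega, by rw [hyi]; exact ⟨hiL, hpos⟩⟩
      · refine ⟨y, hy, ?_⟩
        simp only [Bool.and_eq_true, decide_eq_true_eq, p1pos_iff]
        have h1 : i = y + d1 + d2 := by omega
        subst h1
        refine ⟨⟨by omega, hiL, hpos⟩, ?_⟩
        rw [show y + d1 + d2 - d2 = y + d1 from by ring,
            show y + d1 + d2 - d1 = y + d2 from by ring] at hcond
        exact hcond
      · exact absurd heq hd
  · -- no direct hit, doubles
    have hdd : d1 = d2 := by
      by_contra hne
      exact hd hne
    subst hdd
    have hnd : ∀ x ∈ ((PySem.List.pyRange 1 25 1).filter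
        (fun j => PySem.List.pyGetD board_p2 j 0 == 1)).map (fun j => 25 - j),
        ¬ ((PySem.Set.ofList [d1, d1]).any
          (fun d => decide (x + d ≤ 24) && (PySem.Set.ofList ((PySem.List.pyRange 1 25 1).filter
            (fun i => decide (0 < PySem.List.pyGetD board_p1 i 0)))).contains (x + d)) = true) := by
      intro x hx hfx
      exact hdir (List.any_eq_true.mpr ⟨x, hx, hfx⟩)
    rw [Bool.eq_iff_iff, List.any_eq_true, List.any_eq_true]
    constructor
    · rintro ⟨y, hy, hdbl⟩
      simp only [List.any_cons, List.any_nil, Bool.or_false, Bool.or_eq_true,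
        Bool.and_eq_true, decide_eq_true_eq, p1pos_iff] at hdbl
      refine ⟨y, hy, ?_⟩
      rw [reach_iff]
      rcases hdbl with ⟨⟨hle, hiL, hpos⟩, hall⟩ | ⟨⟨hle, hiL, hpos⟩, hall⟩ | ⟨⟨hle, hiL, hpos⟩, hall⟩
      · exact ⟨y + 2 * d1, hiL, hpos, Or.inr (Or.inr (Or.inr ⟨rfl,
          Or.inl ⟨(all_shift _ d1 y 2 (by tauto)).mpr hall, by ring⟩⟩))⟩
      · exact ⟨y + 3 * d1, hiL, hpos, Or.inr (Or.inr (Or.inr ⟨rfl,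
          Or.inr (Or.inl ⟨(all_shift _ d1 y 3 (by tauto)).mpr hall, by ring⟩)⟩))⟩
      · exact ⟨y + 4 * d1, hiL, hpos, Or.inr (Or.inr (Or.inr ⟨rfl,
          Or.inr (Or.inr ⟨(all_shift _ d1 y 4 (by tauto)).mpr hall, by ring⟩)⟩))⟩
    · rintro ⟨y, hy, hre⟩
      rw [reach_iff] at hre
      obtain ⟨i, hiL, hpos, hadds⟩ := hre
      have hle := (hL24 i hiL).2
      rcases hadds with h | h | ⟨hne, _⟩ | ⟨_, hks⟩
      · exfalso
        have hth := hnd y hy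
        rw [pair_set_any] at hth
        simp only [Bool.or_eq_true, Bool.and_eq_true, decide_eq_true_eq, p1pos_iff,
          not_or] at hth
        have hyi : y + d1 = i := by omega
        exact hth.1 ⟨by omega, by rw [hyi]; exact ⟨hiL, hpos⟩⟩
      · exfalso
        have hth := hnd y hy
        rw [pair_set_any] at hth
        simp only [Bool.or_eq_true, Bool.and_eq_true, decide_eq_true_eq, p1pos_iff,
          not_or] at hth
        have hyi : y + d1 = i := by omega
        exact hth.1 ⟨by omega, by rw [hyi]; exact ⟨hiL, hpos⟩⟩
      · exact absurd rfl hne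
      · refine ⟨y, hy, ?_⟩
        simp only [List.any_cons, List.any_nil, Bool.or_false, Bool.or_eq_true,
          Bool.and_eq_true, decide_eq_true_eq, p1pos_iff]
        rcases hks with ⟨hall, hyk⟩ | ⟨hall, hyk⟩ | ⟨hall, hyk⟩
        · have hyi : i = y + 2 * d1 := by omega
          subst hyi
          exact Or.inl ⟨⟨by omega, hiL, hpos⟩,
            (all_shift _ d1 y 2 (by tauto)).mp hall⟩
        · have hyi : i = y + 3 * d1 := by omega
          subst hyi
          exact Or.inr (Or.inl ⟨⟨by omega, hiL, hpos⟩,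
            (all_shift _ d1 y 3 (by tauto)).mp hall⟩)
        · have hyi : i = y + 4 * d1 := by omega
          subst hyi
          exact Or.inr (Or.inr ⟨⟨by omega, hiL, hpos⟩,
            (all_shift _ d1 y 4 (by tauto)).mp hall⟩)

-- ===== VERDICT (by name: the statement is the Claim_ definition above) =====
theorem can_hit_this_roll_spec : Claim_equal_can_hit_this_roll := by
  intro b1 b2 dice _ _
  unfold Spec_can_hit_this_roll
  match dice with
  | none => rfl
  | some [] => rfl
  | some [d] => rfl
  | some (d1 :: d2 :: rest) => exact core_eq b1 b2 d1 d2 rest
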